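-- pv_equiv track=rewrite | github.com/hyossid/OSL_TechAssignment | pricingstrategies.py | buyanddiscount
-- ===== SOURCE A (Python) =====
-- def buyanddiscount(bucket, product, threshold, discountprice):
--
--     """
--     This Strategy is for buy more than "threshold", get in "discountprice".
--     :param bucket: current product and prices in the bucket
--     :param product: Target product to be checked through this strategy
--     :param threshold: Given Threshold criteria of applying this strategy
--     :param discountprice: Discounted price after buying more than threshold
--     :return: strategy applied bucket
--     """
--
--     # Number of appearance of product
--     count = 0
--
--     # Iterate Current bucket and count
--     for item, price in bucket:
--         if item == product:
--             count += 1
--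
--     # If more than threshold, change the product price to discount price
--     if count >= threshold:
--         for i in range(len(bucket)):
--             if bucket[i][0] == product:
--                 bucket[i][1] = discountprice
--
--     return bucket
-- ===== SOURCE B (Python) =====
-- def buyanddiscount(bucket, product, threshold, discountprice):
--     # Single fused pass: speculatively build the fully-discounted copy of the
--     # bucket while counting matches; at the end pick the copy if the count
--     # reached the threshold, otherwise return the untouched bucket.
--     count = 0
--     discounted = []
--     for item, price in bucket:
--         if item == product:
--             count += 1
--             discounted.append([item, discountprice])
--         else:
--             discounted.append([item, price])
--     return discounted if count >= threshold else bucket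
-- ===== Notes on version B (the rewrite author's own statement) =====
-- stated objective: alternative
-- what changed: A makes a counting scan and then a second full scan that mutates matching rows in place; B makes one fused pass that speculatively builds a fresh fully-discounted copy while counting, and at the end returns that copy or the untouched bucket, never rescanning or mutating.
import Mathlib
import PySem

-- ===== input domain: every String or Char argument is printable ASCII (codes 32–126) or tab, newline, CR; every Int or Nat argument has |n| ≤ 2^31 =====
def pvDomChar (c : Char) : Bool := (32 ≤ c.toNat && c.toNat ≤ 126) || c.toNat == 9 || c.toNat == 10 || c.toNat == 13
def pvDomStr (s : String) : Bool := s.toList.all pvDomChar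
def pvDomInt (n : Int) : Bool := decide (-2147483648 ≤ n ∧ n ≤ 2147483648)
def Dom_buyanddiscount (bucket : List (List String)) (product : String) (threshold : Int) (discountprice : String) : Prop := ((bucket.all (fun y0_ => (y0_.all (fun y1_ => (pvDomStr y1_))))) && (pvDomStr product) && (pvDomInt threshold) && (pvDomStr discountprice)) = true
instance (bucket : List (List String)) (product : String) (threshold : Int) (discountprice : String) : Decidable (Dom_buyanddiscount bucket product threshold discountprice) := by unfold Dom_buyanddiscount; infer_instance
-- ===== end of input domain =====

-- B replaces A's count-scan-plus-rescan with one fused pass that speculatively builds a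
-- fully-discounted copy while counting, then returns the copy or the untouched bucket;
-- objective: alternative. Python A mutates `bucket`'s rows in place, B does not mutate;
-- the theorems are about the return value only.


-- ===== PORT A =====
-- 'for item, price in bucket' unpacks each row (exactly 2 entries under Pre_); item = row.getD 0 "".
def buyanddiscount (bucket : List (List String)) (product : String) (threshold : Int) (discountprice : String) : List (List String) :=
  let count : Int := bucket.foldl (fun c row => if row.getD 0 "" = product then c + 1 else c) 0
  if count ≥ threshold then
    (PySem.List.pyRange 0 (bucket.length : Int) 1).foldl
      (fun acc i =>
        if (acc.getD i.toNat []).getD 0 "" = product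
        then acc.modify i.toNat (fun row => row.set 1 discountprice)
        else acc) bucket
  else bucket

-- ===== PORT B =====
-- one fused pass: state = (count so far, speculative discounted copy built so far)
def buyanddiscount_alt (bucket : List (List String)) (product : String) (threshold : Int) (discountprice : String) : List (List String) :=
  let st : Int × List (List String) :=
    bucket.foldl
      (fun st row =>
        let item := row.getD 0 ""
        let price := row.getD 1 ""
        if item = product then (st.1 + 1, st.2 ++ [[item, discountprice]])
        else (st.1, st.2 ++ [[item, price]]))
      (0, [])
  if st.1 ≥ threshold then st.2 else bucket

-- ===== PRECONDITION & SPEC =====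
-- Pre_ excludes buckets with a row that does not have exactly 2 entries: there Python A
-- raises ValueError unpacking 'for item, price in bucket' (and B raises likewise).
def Pre_buyanddiscount (bucket : List (List String)) (product : String) (threshold : Int) (discountprice : String) : Prop :=
  ∀ row ∈ bucket, row.length = 2
instance (bucket : List (List String)) (product : String) (threshold : Int) (discountprice : String) : Decidable (Pre_buyanddiscount bucket product threshold discountprice) := by unfold Pre_buyanddiscount; infer_instance

def pvWitness_buyanddiscount : List (List String) × String × Int × String :=
  ([["apple", "3"], ["pear", "2"], ["apple", "3"]], "apple", 2, "1")

def Spec_buyanddiscount (bucket : List (List String)) (product : String) (threshold : Int) (discountprice : String) (out : List (List String)) : Prop := out = buyanddiscount_alt bucket product threshold discountprice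
instance (bucket : List (List String)) (product : String) (threshold : Int) (discountprice : String) (out : List (List String)) : Decidable (Spec_buyanddiscount bucket product threshold discountprice out) := by unfold Spec_buyanddiscount; infer_instance

-- ===== CLAIM (what is proved, stated in full; the proofs are below) =====
def Claim_equal_buyanddiscount : Prop := ∀ (bucket : List (List String)) (product : String) (threshold : Int) (discountprice : String), Dom_buyanddiscount bucket product threshold discountprice → Pre_buyanddiscount bucket product threshold discountprice → Spec_buyanddiscount bucket product threshold discountprice (buyanddiscount bucket product threshold discountprice)

-- ===== LEMMAS AND PROOFS =====

-- A's count loop counts the rows whose head matches.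
theorem pv_count_eq (P : List String → Prop) [DecidablePred P] (xs : List (List String)) (c : Int) :
    xs.foldl (fun c row => if P row then c + 1 else c) c = c + ((xs.filter (fun r => decide (P r))).length : Int) := by
  induction xs generalizing c with
  | nil => simp
  | cons x t ih =>
    by_cases h : P x <;> simp [List.foldl_cons, h, ih] <;> omega

-- A's rescan shifted by one index (Nat version, after converting pyRange to List.range)
theorem pv_stepA_shift (P : List String → Prop) [DecidablePred P] (f : List String → List String)
    (x : List String) (t : List (List String)) (ns : List Nat) :
    (ns.map (· + 1)).foldl
        (fun acc k => if P (acc.getD k []) then acc.modify k f else acc) (x :: t)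
      = x :: ns.foldl (fun acc k => if P (acc.getD k []) then acc.modify k f else acc) t := by
  induction ns generalizing t with
  | nil => simp
  | cons n ns ih =>
    simp only [List.map_cons, List.foldl_cons, List.getD_cons_succ, List.modify_succ_cons]
    split_ifs with h
    · exact ih _
    · exact ih _

-- A's rescan over all indices (Nat index form) = pointwise conditional map.
theorem pv_A_apply_nat (P : List String → Prop) [DecidablePred P] (f : List String → List String)
    (xs : List (List String)) :
    (List.range xs.length).foldl
        (fun acc k => if P (acc.getD k []) then acc.modify k f else acc) xs
      = xs.map (fun r => if P r then f r else r) := by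
  induction xs with
  | nil => simp
  | cons x t ih =>
    simp only [List.length_cons]
    rw [List.range_succ_eq_map, List.foldl_cons]
    by_cases h : P x
    · have hx : (x :: t).getD 0 [] = x := rfl
      simp only [hx, h, if_true, List.modify_zero_cons]
      rw [pv_stepA_shift P f (f x) t, ih]
      simp [h]
    · have hx : (x :: t).getD 0 [] = x := rfl
      simp only [hx, h, if_false]
      rw [pv_stepA_shift P f x t, ih]
      simp [h]

-- A's rescan over pyRange = pointwise conditional map.
theorem pv_A_apply (P : List String → Prop) [DecidablePred P] (f : List String → List String)
    (xs : List (List String)) :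
    ((PySem.List.pyRange 0 (xs.length : Int) 1).foldl
        (fun acc i => if P (acc.getD i.toNat []) then acc.modify i.toNat f else acc) xs)
      = xs.map (fun r => if P r then f r else r) := by
  have hr : PySem.List.pyRange 0 (xs.length : Int) 1
      = (List.range xs.length).map Int.ofNat := by
    rw [PySem.List.pyRange_one]
    simp only [sub_zero, Int.toNat_natCast, zero_add]
    rfl
  rw [hr, List.foldl_map]
  simp only [Int.ofNat_eq_natCast, Int.toNat_natCast]
  exact pv_A_apply_nat P f xs

-- B's fused pass = (count, speculative discounted copy) in closed form.
theorem pv_B_fold (product discountprice : String) (xs : List (List String))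
    (c : Int) (acc : List (List String)) :
    xs.foldl
        (fun st row =>
          let item := row.getD 0 ""
          let price := row.getD 1 ""
          if item = product then (st.1 + 1, st.2 ++ [[item, discountprice]])
          else (st.1, st.2 ++ [[item, price]]))
        (c, acc)
      = (c + ((xs.filter (fun r => decide (r.getD 0 "" = product))).length : Int),
         acc ++ xs.map (fun r =>
           if r.getD 0 "" = product then [r.getD 0 "", discountprice]
           else [r.getD 0 "", r.getD 1 ""])) := by
  induction xs generalizing c acc with
  | nil => simp
  | cons x t ih =>
    by_cases h : x.getD 0 "" = product
    · simp only [List.foldl_cons, List.filter_cons, List.map_cons, h, decide_true, if_true, ih]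
      simp
      omega
    · simp only [List.foldl_cons, List.filter_cons, List.map_cons, h, decide_false, if_false, ih]
      simp

-- a two-entry row rebuilt from its fields is itself / its price-updated version
theorem pv_row_two (r : List String) (h : r.length = 2) (d : String) :
    [r.getD 0 "", r.getD 1 ""] = r ∧ [r.getD 0 "", d] = r.set 1 d := by
  match r, h with
  | [a, b], _ => simp

-- ===== VERDICT (by name: the statement is the Claim_ definition above) =====
theorem buyanddiscount_spec : Claim_equal_buyanddiscount := by
  intro bucket product threshold discountprice _ hpre
  unfold Spec_buyanddiscount buyanddiscount buyanddiscount_alt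
  rw [pv_B_fold, pv_count_eq (fun r => r.getD 0 "" = product) bucket 0]
  simp only [zero_add, List.nil_append]
  have hmap : bucket.map (fun r =>
        if r.getD 0 "" = product then [r.getD 0 "", discountprice]
        else [r.getD 0 "", r.getD 1 ""])
      = bucket.map (fun r => if r.getD 0 "" = product then r.set 1 discountprice else r) := by
    apply List.map_congr_left
    intro r hr
    obtain ⟨h1, h2⟩ := pv_row_two r (hpre r hr) discountprice
    simp only [List.getD] at h1 h2
    by_cases h : r.getD 0 "" = product <;> simp [h, h1, h2]
  rw [hmap]
  split
  · exact pv_A_apply (fun r => r.getD 0 "" = product) (fun row => row.set 1 discountprice) bucket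
  · rfl
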